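-- pv_equiv track=rewrite | github.com/dimaryaz/jdmtool | write_taws_file.py | datablock_checksum_pagesize512
-- ===== SOURCE A (Python) =====
-- _datablock_lookup_table = (b'\x00\x01\x03\x02\x05\x04\x06\x07\x07\x06\x04\x05\x02\x03\x01\x00\x09\x08\x0A\x0B\x0C\x0D'
--                            b'\x0F\x0E\x0E\x0F\x0D\x0C\x0B\x0A\x08\x09\x0B\x0A\x08\x09\x0E\x0F\x0D\x0C\x0C\x0D\x0F\x0E'
--                            b'\x09\x08\x0A\x0B\x02\x03\x01\x00\x07\x06\x04\x05\x05\x04\x06\x07\x00\x01\x03\x02\x0D\x0C'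
--                            b'\x0E\x0F\x08\x09\x0B\x0A\x0A\x0B\x09\x08\x0F\x0E\x0C\x0D\x04\x05\x07\x06\x01\x00\x02\x03'
--                            b'\x03\x02\x00\x01\x06\x07\x05\x04\x06\x07\x05\x04\x03\x02\x00\x01\x01\x00\x02\x03\x04\x05'
--                            b'\x07\x06\x0F\x0E\x0C\x0D\x0A\x0B\x09\x08\x08\x09\x0B\x0A\x0D\x0C\x0E\x0F\x0F\x0E\x0C\x0D'
--                            b'\x0A\x0B\x09\x08\x08\x09\x0B\x0A\x0D\x0C\x0E\x0F\x06\x07\x05\x04\x03\x02\x00\x01\x01\x00'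
--                            b'\x02\x03\x04\x05\x07\x06\x04\x05\x07\x06\x01\x00\x02\x03\x03\x02\x00\x01\x06\x07\x05\x04'
--                            b'\x0D\x0C\x0E\x0F\x08\x09\x0B\x0A\x0A\x0B\x09\x08\x0F\x0E\x0C\x0D\x02\x03\x01\x00\x07\x06'
--                            b'\x04\x05\x05\x04\x06\x07\x00\x01\x03\x02\x0B\x0A\x08\x09\x0E\x0F\x0D\x0C\x0C\x0D\x0F\x0E'
--                            b'\x09\x08\x0A\x0B\x09\x08\x0A\x0B\x0C\x0D\x0F\x0E\x0E\x0F\x0D\x0C\x0B\x0A\x08\x09\x00\x01'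
--                            b'\x03\x02\x05\x04\x06\x07\x07\x06\x04\x05\x02\x03\x01\x00')
--
-- def datablock_checksum_pagesize512(datablock, footer):
--     value = 0
--     index = 0x600
--     for d in footer:
--         value ^= _datablock_lookup_table[d] << 0x1c
--         if (_datablock_lookup_table[d] & 1) != 0:
--             value = value ^ index
--         index += 1
--
--     index = 0xc00
--     for d in datablock:
--         value = value ^ _datablock_lookup_table[d] << 0x1c
--         if (_datablock_lookup_table[d] & 1) != 0:
--             value = value ^ index
--         index += 1
--     index = value << 4
--     value = index | value >> 0x1c
--
--     index = (index >> 8 << 24 | _datablock_lookup_table[(index >> 8 ^ value) >> 1 & 0xff]) & 0xffffff01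
--     return (index | (index ^ value)) & 0xffff
-- ===== SOURCE B (Python) =====
-- # Table-free, two-pass reimplementation: the 256-entry lookup table is a GF(2)-linear
-- # map of the byte's bits (t[1<<k] = 2*k+1, t[x^y] = t[x]^t[y]), so each nibble is
-- # computed by XOR-ing 2*k+1 over the set bits and the odd-branch test t[d]&1 is the
-- # byte's bit parity (a shift-fold); the interleaved loop is replaced by one pass
-- # accumulating the shifted nibbles and one pass accumulating the odd-parity indices.
--
-- def _nibble(b):
--     # t[b] for 0 <= b < 256: XOR of (2*k + 1) over the set bits k of the byte
--     r = 0
--     for k in range(8):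
--         if (b >> k) & 1:
--             r ^= 2 * k + 1
--     return r
--
-- def _parity(b):
--     # bit parity of the byte == t[b] & 1
--     b ^= b >> 4
--     b ^= b >> 2
--     b ^= b >> 1
--     return b & 1
--
-- def datablock_checksum_pagesize512(datablock, footer):
--     # pass 1: top-nibble contributions via the GF(2) closed form
--     high = 0
--     for d in footer:
--         high ^= _nibble(d & 0xff) << 0x1c
--     for d in datablock:
--         high ^= _nibble(d & 0xff) << 0x1c
--     # pass 2: XOR of running indices at bytes of odd bit parity
--     low = 0
--     for i, d in enumerate(footer, 0x600):
--         if _parity(d & 0xff):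
--             low ^= i
--     for i, d in enumerate(datablock, 0xc00):
--         if _parity(d & 0xff):
--             low ^= i
--     value = high ^ low
--     index = value << 4
--     value = index | value >> 0x1c
--     index = (index >> 8 << 24 | _nibble((index >> 8 ^ value) >> 1 & 0xff)) & 0xffffff01
--     return (index | (index ^ value)) & 0xffff
-- ===== Notes on version B (the rewrite author's own statement) =====
-- stated objective: alternative
-- what changed: B eliminates the 256-entry lookup table entirely -- the table is a GF(2)-linear map, so each nibble is computed as the XOR of 2k+1 over the byte's set bits and the odd-branch test becomes the byte's bit parity via a shift-fold -- and replaces A's single interleaved (value,index) loop by two independent XOR-accumulation passes (shifted nibbles; odd-parity indices) combined before the unchanged bit-twiddling tail.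
import Mathlib
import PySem

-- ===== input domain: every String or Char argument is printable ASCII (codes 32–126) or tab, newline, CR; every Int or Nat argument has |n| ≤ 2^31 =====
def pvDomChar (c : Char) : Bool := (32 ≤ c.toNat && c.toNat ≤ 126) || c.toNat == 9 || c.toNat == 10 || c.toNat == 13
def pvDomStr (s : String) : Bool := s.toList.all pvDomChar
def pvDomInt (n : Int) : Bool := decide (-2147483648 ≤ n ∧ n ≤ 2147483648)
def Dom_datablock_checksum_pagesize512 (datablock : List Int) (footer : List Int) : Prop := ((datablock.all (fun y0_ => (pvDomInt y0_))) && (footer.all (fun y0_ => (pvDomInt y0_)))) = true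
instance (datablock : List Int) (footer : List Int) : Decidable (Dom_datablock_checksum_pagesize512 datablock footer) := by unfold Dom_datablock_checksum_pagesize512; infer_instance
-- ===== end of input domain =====

-- ===== PORT A =====
-- B removes the lookup table (each nibble is the GF(2)-linear map XOR of 2k+1 over the
-- byte's set bits, the odd test is the byte's bit parity) and computes the pre-tail value
-- in two independent XOR passes instead of A's interleaved loop; objective: alternative.
-- _datablock_lookup_table (256 byte values, module constant of A)
def pvTable : List Int := [0,1,3,2,5,4,6,7,7,6,4,5,2,3,1,0,9,8,10,11,12,13,15,14,14,15,13,12,11,10,8,9,11,10,8,9,14,15,13,12,12,13,15,14,9,8,10,11,2,3,1,0,7,6,4,5,5,4,6,7,0,1,3,2,13,12,14,15,8,9,11,10,10,11,9,8,15,14,12,13,4,5,7,6,1,0,2,3,3,2,0,1,6,7,5,4,6,7,5,4,3,2,0,1,1,0,2,3,4,5,7,6,15,14,12,13,10,11,9,8,8,9,11,10,13,12,14,15,15,14,12,13,10,11,9,8,8,9,11,10,13,12,14,15,6,7,5,4,3,2,0,1,1,0,2,3,4,5,7,6,4,5,7,6,1,0,2,3,3,2,0,1,6,7,5,4,13,1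2,14,15,8,9,11,10,10,11,9,8,15,14,12,13,2,3,1,0,7,6,4,5,5,4,6,7,0,1,3,2,11,10,8,9,14,15,13,12,12,13,15,14,9,8,10,11,9,8,10,11,12,13,15,14,14,15,13,12,11,10,8,9,0,1,3,2,5,4,6,7,7,6,4,5,2,3,1,0]

-- _datablock_lookup_table[d]: Python indexing (negative wraps, out of range raises).
-- `.getD 0` is reached only outside Pre_datablock_checksum_pagesize512 (where Python raises IndexError).
def pvLookup (d : Int) : Int := (PySem.List.pyGet? pvTable d).getD 0

-- one iteration of A's loop body over the state (value, index)
def pvStepA (s : Int × Int) (d : Int) : Int × Int :=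
  let v := PySem.Int.bxor s.1 (pvLookup d <<< 0x1c)
  (if PySem.Int.band (pvLookup d) 1 ≠ 0 then PySem.Int.bxor v s.2 else v, s.2 + 1)

-- A's final bit-twiddling tail (uses the table)
def pvTail (value : Int) : Int :=
  let index := value <<< 4
  let value := PySem.Int.bor index (value >>> 0x1c)
  let index := PySem.Int.band
    (PySem.Int.bor ((index >>> 8) <<< 24)
      (pvLookup (PySem.Int.band ((PySem.Int.bxor (index >>> 8) value) >>> 1) 0xff))) 0xffffff01
  PySem.Int.band (PySem.Int.bor index (PySem.Int.bxor index value)) 0xffff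

def datablock_checksum_pagesize512 (datablock : List Int) (footer : List Int) : Int :=
  let s1 := footer.foldl pvStepA (0, 0x600)
  let s2 := datablock.foldl pvStepA (s1.1, 0xc00)
  pvTail s2.1

-- ===== PORT B =====
-- _nibble(b): `for k in range(8)` ported as a fold over List.range 8 (k : Nat, cast where used as a number)
def pvNibble (b : Int) : Int :=
  (List.range 8).foldl
    (fun r k => if PySem.Int.band (b >>> k) 1 ≠ 0 then PySem.Int.bxor r (2 * (k : Int) + 1) else r) 0

-- _parity(b): shift-fold bit parity
def pvParity (b : Int) : Int :=
  let b1 := PySem.Int.bxor b (b >>> 4)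
  let b2 := PySem.Int.bxor b1 (b1 >>> 2)
  let b3 := PySem.Int.bxor b2 (b2 >>> 1)
  PySem.Int.band b3 1

-- pass 1 body: high ^= _nibble(d & 0xff) << 0x1c
def pvStepH (h : Int) (d : Int) : Int :=
  PySem.Int.bxor h (pvNibble (PySem.Int.band d 0xff) <<< 0x1c)

-- pass 2 body over (low, i): if _parity(d & 0xff): low ^= i
def pvStepL (s : Int × Int) (d : Int) : Int × Int :=
  (if pvParity (PySem.Int.band d 0xff) ≠ 0 then PySem.Int.bxor s.1 s.2 else s.1, s.2 + 1)

-- B's tail: identical lines, with the computed nibble in place of the table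
def pvTailB (value : Int) : Int :=
  let index := value <<< 4
  let value := PySem.Int.bor index (value >>> 0x1c)
  let index := PySem.Int.band
    (PySem.Int.bor ((index >>> 8) <<< 24)
      (pvNibble (PySem.Int.band ((PySem.Int.bxor (index >>> 8) value) >>> 1) 0xff))) 0xffffff01
  PySem.Int.band (PySem.Int.bor index (PySem.Int.bxor index value)) 0xffff

def datablock_checksum_pagesize512_alt (datablock : List Int) (footer : List Int) : Int :=
  let high := datablock.foldl pvStepH (footer.foldl pvStepH 0)
  let low := (datablock.foldl pvStepL ((footer.foldl pvStepL (0, 0x600)).1, 0xc00)).1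
  pvTailB (PySem.Int.bxor high low)

-- ===== PRECONDITION & SPEC =====
-- Pre_ excludes exactly the inputs where some byte is outside -256..255, on which Python's
-- _datablock_lookup_table[d] raises IndexError (the table has 256 entries).
def Pre_datablock_checksum_pagesize512 (datablock : List Int) (footer : List Int) : Prop :=
  (∀ d ∈ datablock, -256 ≤ d ∧ d < 256) ∧ (∀ d ∈ footer, -256 ≤ d ∧ d < 256)
instance (datablock : List Int) (footer : List Int) : Decidable (Pre_datablock_checksum_pagesize512 datablock footer) := by unfold Pre_datablock_checksum_pagesize512; infer_instance
def pvWitness_datablock_checksum_pagesize512 : List Int × List Int := ([1, 2, 3], [4, 5, 250])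

def Spec_datablock_checksum_pagesize512 (datablock : List Int) (footer : List Int) (out : Int) : Prop := out = datablock_checksum_pagesize512_alt datablock footer
instance (datablock : List Int) (footer : List Int) (out : Int) : Decidable (Spec_datablock_checksum_pagesize512 datablock footer out) := by unfold Spec_datablock_checksum_pagesize512; infer_instance

-- ===== CLAIM (what is proved, stated in full; the proofs are below) =====
def Claim_equal_datablock_checksum_pagesize512 : Prop := ∀ (datablock : List Int) (footer : List Int), Dom_datablock_checksum_pagesize512 datablock footer → Pre_datablock_checksum_pagesize512 datablock footer → Spec_datablock_checksum_pagesize512 datablock footer (datablock_checksum_pagesize512 datablock footer)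

-- ===== LEMMAS AND PROOFS =====

-- proof-only: A's two per-byte contributions as separate table-based step functions
def pvStepH' (h : Int) (d : Int) : Int := PySem.Int.bxor h (pvLookup d <<< 0x1c)
def pvStepL' (s : Int × Int) (d : Int) : Int × Int :=
  (if PySem.Int.band (pvLookup d) 1 ≠ 0 then PySem.Int.bxor s.1 s.2 else s.1, s.2 + 1)

-- XOR is associative on Int (PySem ships comm and zero; assoc is specific enough to prove here)
theorem pvBxorAssoc (a b c : Int) :
    PySem.Int.bxor (PySem.Int.bxor a b) c = PySem.Int.bxor a (PySem.Int.bxor b c) := by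
  unfold PySem.Int.bxor
  have h1 : ∀ x : Nat, (0:Int) ≤ (x:Int) := fun x => Int.natCast_nonneg x
  have h2 : ∀ x : Nat, ¬ (0:Int) ≤ -(x:Int) - 1 := by intro x; omega
  split_ifs <;> simp_all [Nat.xor_assoc] <;> omega

theorem pvBxorLeftComm (a b c : Int) :
    PySem.Int.bxor a (PySem.Int.bxor b c) = PySem.Int.bxor b (PySem.Int.bxor a c) := by
  rw [← pvBxorAssoc, PySem.Int.bxor_comm a b, pvBxorAssoc]

theorem pvBxorZeroLeft (a : Int) : PySem.Int.bxor 0 a = a := by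
  rw [PySem.Int.bxor_comm]; simp

theorem pvFoldH_shift (l : List Int) (h : Int) :
    l.foldl pvStepH' h = PySem.Int.bxor h (l.foldl pvStepH' 0) := by
  induction l generalizing h with
  | nil => simp [List.foldl]
  | cons d l ih =>
    simp only [List.foldl]
    rw [ih (pvStepH' h d), ih (pvStepH' 0 d)]
    simp only [pvStepH']
    rw [PySem.Int.bxor_comm 0, PySem.Int.bxor_zero, pvBxorAssoc]

theorem pvFoldL_shift (l : List Int) (w i : Int) :
    (l.foldl pvStepL' (w, i)).1 = PySem.Int.bxor w ((l.foldl pvStepL' (0, i)).1) := by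
  induction l generalizing w i with
  | nil => simp [List.foldl]
  | cons d l ih =>
    simp only [List.foldl, pvStepL']
    by_cases hc : PySem.Int.band (pvLookup d) 1 ≠ 0
    · simp only [if_pos hc]
      rw [ih (PySem.Int.bxor w i), ih (PySem.Int.bxor 0 i)]
      rw [pvBxorZeroLeft, pvBxorAssoc]
    · simp only [if_neg hc]
      exact ih w (i + 1)

-- A's interleaved loop splits into the two table-based passes
theorem pvLoopSplit (l : List Int) (v i : Int) :
    (l.foldl pvStepA (v, i)).1 =
      PySem.Int.bxor (PySem.Int.bxor v (l.foldl pvStepH' 0)) ((l.foldl pvStepL' (0, i)).1) := by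
  induction l generalizing v i with
  | nil => simp [List.foldl]
  | cons d l ih =>
    simp only [List.foldl]
    rw [ih, pvFoldH_shift l (pvStepH' 0 d)]
    simp only [pvStepA, pvStepH', pvStepL']
    by_cases hc : PySem.Int.band (pvLookup d) 1 ≠ 0
    · simp only [if_pos hc]
      rw [pvFoldL_shift l (PySem.Int.bxor 0 i) (i + 1)]
      simp [pvBxorZeroLeft, pvBxorLeftComm, PySem.Int.bxor_comm]
    · simp only [if_neg hc]
      simp [pvBxorZeroLeft, pvBxorLeftComm, PySem.Int.bxor_comm]

-- the table agrees with the computed nibble/parity on every in-range index (512 cases)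
def pvCheck (n : Nat) : Bool :=
  let d : Int := (n : Int) - 256
  (pvLookup d == pvNibble (PySem.Int.band d 255)) &&
  (decide (PySem.Int.band (pvLookup d) 1 ≠ 0) == decide (pvParity (PySem.Int.band d 255) ≠ 0))

set_option maxRecDepth 40000 in
theorem pvCheckAll : (List.range 512).all pvCheck = true := by decide

theorem pvKey (d : Int) (h1 : -256 ≤ d) (h2 : d < 256) :
    pvLookup d = pvNibble (PySem.Int.band d 255) ∧
    (PySem.Int.band (pvLookup d) 1 ≠ 0 ↔ pvParity (PySem.Int.band d 255) ≠ 0) := by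
  have hm : (d + 256).toNat ∈ List.range 512 := by
    simp only [List.mem_range]; omega
  have hc := List.all_eq_true.mp pvCheckAll _ hm
  unfold pvCheck at hc
  rw [show (((d + 256).toNat : Int) - 256) = d by omega] at hc
  simp only [Bool.and_eq_true, beq_iff_eq, decide_eq_decide] at hc
  exact hc

theorem pvBand255_bounds (x : Int) : 0 ≤ PySem.Int.band x 255 ∧ PySem.Int.band x 255 < 256 := by
  unfold PySem.Int.band
  simp only [show ((255:Int)).toNat = 255 from rfl]
  split_ifs with h1 h2
  · have := Nat.and_le_right (n := x.toNat) (m := 255); omega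
  · omega
  · have := Nat.sub_le 255 (255 &&& (-x - 1).toNat); omega
  · omega

theorem pvBand255_idem (x : Int) :
    PySem.Int.band (PySem.Int.band x 255) 255 = PySem.Int.band x 255 := by
  obtain ⟨h0, h1⟩ := pvBand255_bounds x
  rw [PySem.Int.band_of_nonneg h0 (by omega)]
  simp only [show ((255:Int)).toNat = 255 from rfl]
  have := Nat.and_two_pow_sub_one_eq_mod (PySem.Int.band x 255).toNat 8
  norm_num at this
  omega

theorem pvLookup_band (y : Int) :
    pvLookup (PySem.Int.band y 255) = pvNibble (PySem.Int.band y 255) := by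
  have hb := pvBand255_bounds y
  rw [(pvKey _ (by omega) hb.2).1, pvBand255_idem]

-- the two tails agree (the tail's table index is already masked to 0..255)
theorem pvTail_eq (v : Int) : pvTail v = pvTailB v := by
  unfold pvTail pvTailB
  simp only
  rw [pvLookup_band]

theorem pvFoldH_eq (l : List Int) (hl : ∀ d ∈ l, -256 ≤ d ∧ d < 256) (init : Int) :
    l.foldl pvStepH' init = l.foldl pvStepH init :=
  PySem.List.foldl_congr_mem l pvStepH' pvStepH init (fun acc x hx => by
    unfold pvStepH' pvStepH
    rw [(pvKey x (hl x hx).1 (hl x hx).2).1])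

theorem pvFoldL_eq (l : List Int) (hl : ∀ d ∈ l, -256 ≤ d ∧ d < 256) (init : Int × Int) :
    l.foldl pvStepL' init = l.foldl pvStepL init :=
  PySem.List.foldl_congr_mem l pvStepL' pvStepL init (fun acc x hx => by
    have h := (pvKey x (hl x hx).1 (hl x hx).2).2
    simp only [pvStepL', pvStepL, h])

-- ===== VERDICT (by name: the statement is the Claim_ definition above) =====
theorem datablock_checksum_pagesize512_spec : Claim_equal_datablock_checksum_pagesize512 := by
  intro datablock footer _ hpre
  unfold Spec_datablock_checksum_pagesize512
  unfold datablock_checksum_pagesize512 datablock_checksum_pagesize512_alt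
  simp only
  rw [← pvTail_eq,
      ← pvFoldH_eq footer hpre.2, ← pvFoldH_eq datablock hpre.1,
      ← pvFoldL_eq footer hpre.2, ← pvFoldL_eq datablock hpre.1]
  rw [pvLoopSplit, pvLoopSplit]
  congr 1
  rw [pvFoldH_shift datablock (List.foldl pvStepH' 0 footer),
      pvFoldL_shift datablock ((List.foldl pvStepL' (0, 1536) footer).1) 3072]
  simp [pvBxorZeroLeft, pvBxorLeftComm, PySem.Int.bxor_comm]
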